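-- pv_equiv track=rewrite | github.com/rslabon/aoc2019 | day17.py | find_patterns
-- ===== SOURCE A (Python) =====
-- def find_patterns(s, patterns=[]):
--     if len(patterns) > 3:
--         return None
--     if not s and len(patterns) == 3:
--         return patterns
--
--     for i in range(min(5, len(s)), min(19, len(s))):
--         p = s[0:i]
--         if p[0] not in ["R", "L"] and p[-1] in [",", "R", "L"]:
--             continue
--
--         ss = s[:]
--         ss = ss.replace(p + ",", "")
--         ss = ss.replace(p, "")
--         r = find_patterns(ss, patterns + [p])
--         if r:
--             return r
--
--     return None
-- ===== SOURCE B (Python) =====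
-- def find_patterns(s, patterns=[]):
--     # Iterative depth-first search with an explicit stack instead of recursion.
--     stack = [(s, patterns)]
--     while stack:
--         cur, pats = stack.pop()
--         if len(pats) > 3:
--             continue
--         if not cur and len(pats) == 3:
--             return pats
--         children = []
--         for i in range(min(5, len(cur)), min(19, len(cur))):
--             p = cur[0:i]
--             if p[0] not in ("R", "L") and p[-1] in (",", "R", "L"):
--                 continue
--             ss = cur.replace(p + ",", "").replace(p, "")
--             children.append((ss, pats + [p]))
--         stack.extend(reversed(children))
--     return None
-- ===== Notes on version B (the rewrite author's own statement) =====
-- stated objective: alternative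
-- what changed: A's recursive depth-first search is replaced by an iterative one over an explicit stack of (string, patterns) states, with each node's children built into a list and pushed in reverse so the exploration order (and hence the first 3-pattern cover found) is identical.
import Mathlib
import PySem

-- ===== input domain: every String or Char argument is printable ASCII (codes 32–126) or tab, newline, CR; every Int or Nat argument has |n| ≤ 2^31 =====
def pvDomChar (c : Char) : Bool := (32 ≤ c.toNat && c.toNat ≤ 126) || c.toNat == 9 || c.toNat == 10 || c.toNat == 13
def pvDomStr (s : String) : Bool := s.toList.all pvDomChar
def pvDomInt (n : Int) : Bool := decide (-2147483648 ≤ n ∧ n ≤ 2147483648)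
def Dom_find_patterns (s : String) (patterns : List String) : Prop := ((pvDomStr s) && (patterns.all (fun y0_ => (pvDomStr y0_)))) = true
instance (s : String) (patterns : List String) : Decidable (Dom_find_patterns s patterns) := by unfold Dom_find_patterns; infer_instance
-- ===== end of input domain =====

-- B replaces A's recursive depth-first search by an iterative one over an explicit
-- stack of (string, patterns) states (objective: alternative decomposition; same cost).

-- ===== PORT A =====
-- the three expressions both Pythons share, named once:
-- p = s[0:i]
def fpPfx (s : String) (i : Int) : String := PySem.Str.slice s (some 0) (some i)
-- `p[0] not in ["R","L"] and p[-1] in [",","R","L"]`  (the `continue` filter)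
def fpSkip (p : String) : Bool :=
  (PySem.Str.pyGet? p 0 != some 'R' && PySem.Str.pyGet? p 0 != some 'L') &&
  (PySem.Str.pyGet? p (-1) == some ',' || PySem.Str.pyGet? p (-1) == some 'R' ||
   PySem.Str.pyGet? p (-1) == some 'L')
-- ss = s.replace(p + ",", "").replace(p, "")
def fpNext (s p : String) : String :=
  PySem.Str.replace (PySem.Str.replace s (p ++ ",") "") p ""

-- Literal port of A's recursion.  The fuel argument is only a totality guard:
-- each recursive call extends `patterns` by one element and every call with
-- `patterns.length > 3` returns immediately, so fuel 5 is never exhausted.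
mutual
def fpA : Nat → String → List String → Option (List String)
  | 0, _, _ => none
  | f + 1, s, patterns =>
    if patterns.length > 3 then none
    else if PySem.Str.len s = 0 ∧ patterns.length = 3 then some patterns
    else
      fpLoop f s patterns
        (PySem.List.pyRange (min 5 (PySem.Str.len s)) (min 19 (PySem.Str.len s)) 1)
  termination_by f _ _ => (f, 0)

def fpLoop : Nat → String → List String → List Int → Option (List String)
  | _, _, _, [] => none
  | f, s, patterns, i :: rest =>
    if fpSkip (fpPfx s i) then fpLoop f s patterns rest        -- `continue`
    else
      match fpA f (fpNext s (fpPfx s i)) (patterns ++ [fpPfx s i]) with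
      | some r => if r = [] then fpLoop f s patterns rest else some r   -- `if r: return r`
      | none => fpLoop f s patterns rest
  termination_by f _ _ is => (f, is.length + 1)
end

def find_patterns (s : String) (patterns : List String) : Option (List String) :=
  fpA 5 s patterns

-- ===== PORT B =====
-- the inner `for i in range(...)` loop of B that builds the `children` list
def fpChildren (s : String) (patterns : List String) (is : List Int) :
    List (String × List String) :=
  is.foldl
    (fun acc i =>
      if fpSkip (fpPfx s i) then acc
      else acc ++ [(fpNext s (fpPfx s i), patterns ++ [fpPfx s i])])
    []

-- the `while stack:` loop; the Python stack's top (its last element) is the list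
-- HEAD here, so `stack.extend(reversed(children))` becomes `children ++ rest`.
-- The fuel only guards totality: the number of pops is bounded (see wt below).
def fpStack : Nat → List (String × List String) → Option (List String)
  | 0, _ => none
  | _ + 1, [] => none
  | f + 1, (s, patterns) :: rest =>
    if patterns.length > 3 then fpStack f rest
    else if PySem.Str.len s = 0 ∧ patterns.length = 3 then some patterns
    else
      fpStack f
        (fpChildren s patterns
            (PySem.List.pyRange (min 5 (PySem.Str.len s)) (min 19 (PySem.Str.len s)) 1)
          ++ rest)

def find_patterns_alt (s : String) (patterns : List String) : Option (List String) :=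
  fpStack 50000 [(s, patterns)]

-- ===== PRECONDITION & SPEC =====
def Spec_find_patterns (s : String) (patterns : List String) (out : Option (List String)) : Prop := out = find_patterns_alt s patterns
instance (s : String) (patterns : List String) (out : Option (List String)) : Decidable (Spec_find_patterns s patterns out) := by unfold Spec_find_patterns; infer_instance

-- ===== CLAIM (what is proved, stated in full; the proofs are below) =====
def Claim_equal_find_patterns : Prop := ∀ (s : String) (patterns : List String), Dom_find_patterns s patterns → Spec_find_patterns s patterns (find_patterns s patterns)

-- ===== LEMMAS AND PROOFS =====

-- any `some` result of A carries exactly 3 patterns (so Python's `if r:` = isSome)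
theorem fpA_some_length :
    ∀ (f : Nat) (s : String) (patterns r : List String),
      fpA f s patterns = some r → r.length = 3 := by
  intro f
  induction f with
  | zero => intro s patterns r h; simp [fpA] at h
  | succ f ih =>
    intro s patterns r h
    rw [fpA] at h
    split at h
    · exact absurd h (by simp)
    · split at h
      · rename_i hc
        cases h
        exact hc.2
      · -- the loop case: induction over the index list
        revert h
        generalize (PySem.List.pyRange (min 5 (PySem.Str.len s)) (min 19 (PySem.Str.len s)) 1) = is
        induction is with
        | nil => intro h; simp [fpLoop] at h
        | cons i rest ihl =>
          intro h
          rw [fpLoop] at h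
          split at h
          · exact ihl h
          · revert h
            split
            · rename_i r' hr'
              intro h
              split at h
              · exact ihl h
              · cases h; exact ih _ _ _ hr'
            · exact ihl

-- fuel stability for the loop, given stability of the recursive calls
theorem fpLoop_congr (f g : Nat) (s : String) (patterns : List String)
    (h : ∀ (ss : String) (pp : String),
        fpA f ss (patterns ++ [pp]) = fpA g ss (patterns ++ [pp])) :
    ∀ is : List Int, fpLoop f s patterns is = fpLoop g s patterns is := by
  intro is
  induction is with
  | nil => simp [fpLoop]
  | cons i rest ihl =>
    rw [fpLoop, fpLoop]
    split
    · exact ihl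
    · rw [h]
      split
      · split
        · exact ihl
        · rfl
      · exact ihl

-- fuel stability for A's recursion: any fuel ≥ 5 - patterns.length gives the same value
theorem fpA_stable :
    ∀ (f g : Nat) (s : String) (patterns : List String),
      5 ≤ f + patterns.length → 5 ≤ g + patterns.length →
      fpA f s patterns = fpA g s patterns := by
  intro f
  induction f with
  | zero =>
    intro g s patterns hf hg
    -- patterns.length ≥ 5 > 3: both sides are none
    cases g with
    | zero => rfl
    | succ g =>
      rw [fpA, fpA]
      rw [if_pos (by omega)]
  | succ f ih =>
    intro g s patterns hf hg
    cases g with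
    | zero =>
      rw [fpA, fpA]
      rw [if_pos (by omega)]
    | succ g =>
      rw [fpA, fpA]
      split
      · rfl
      · split
        · rfl
        · exact fpLoop_congr f g s patterns
            (fun ss pp => ih g ss (patterns ++ [pp]) (by simp; omega) (by simp; omega)) _

-- pulling the accumulator out of B's children fold
theorem fpChildren_acc (s : String) (patterns : List String) :
    ∀ (is : List Int) (acc : List (String × List String)),
      is.foldl
        (fun acc i =>
          if fpSkip (fpPfx s i) then acc
          else acc ++ [(fpNext s (fpPfx s i), patterns ++ [fpPfx s i])]) acc
        = acc ++ fpChildren s patterns is := by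
  intro is
  induction is with
  | nil => intro acc; simp [fpChildren]
  | cons i rest ihl =>
    intro acc
    rw [List.foldl_cons]
    rw [show fpChildren s patterns (i :: rest) =
          List.foldl _ (if fpSkip (fpPfx s i) then ([] : List (String × List String))
            else [] ++ [(fpNext s (fpPfx s i), patterns ++ [fpPfx s i])]) rest from rfl]
    split
    · rw [ihl, ihl]; simp
    · rw [ihl, ihl]; simp

-- the unrolling equation for fpChildren
theorem fpChildren_cons (s : String) (patterns : List String) (i : Int) (rest : List Int) :
    fpChildren s patterns (i :: rest) =
      (if fpSkip (fpPfx s i) then []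
       else [(fpNext s (fpPfx s i), patterns ++ [fpPfx s i])]) ++ fpChildren s patterns rest := by
  rw [fpChildren, List.foldl_cons]
  split
  · rw [show (List.foldl _ ([] : List (String × List String)) rest) = fpChildren s patterns rest from rfl]
    simp
  · rw [show (List.foldl _ ([] ++ [(fpNext s (fpPfx s i), patterns ++ [fpPfx s i])]) rest) =
        List.foldl (fun acc i =>
          if fpSkip (fpPfx s i) then acc
          else acc ++ [(fpNext s (fpPfx s i), patterns ++ [fpPfx s i])])
          ([] ++ [(fpNext s (fpPfx s i), patterns ++ [fpPfx s i])]) rest from rfl,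
       fpChildren_acc]
    simp

theorem fpChildren_length (s : String) (patterns : List String) :
    ∀ is : List Int, (fpChildren s patterns is).length ≤ is.length := by
  intro is
  induction is with
  | nil => simp [fpChildren]
  | cons i rest ihl =>
    rw [fpChildren_cons]
    simp only [List.length_append, List.length_cons]
    split <;> simp <;> omega

theorem fpChildren_mem (s : String) (patterns : List String) :
    ∀ (is : List Int) (c : String × List String), c ∈ fpChildren s patterns is →
      c.2.length = patterns.length + 1 := by
  intro is
  induction is with
  | nil => simp [fpChildren]
  | cons i rest ihl =>
    intro c hc
    rw [fpChildren_cons] at hc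
    rcases List.mem_append.1 hc with h | h
    · revert h; split
      · simp
      · intro h; simp at h; subst h; simp
    · exact ihl c h

-- first-success over a list, congruent in the function on the list's members
theorem findSome?_congr_mem {α β : Type} (l : List α) (f g : α → Option β)
    (h : ∀ x ∈ l, f x = g x) : l.findSome? f = l.findSome? g := by
  induction l with
  | nil => rfl
  | cons x xs ih =>
    rw [List.findSome?_cons, List.findSome?_cons, h x (by simp)]
    split <;> first
      | rfl
      | exact ih (fun y hy => h y (by simp [hy]))

-- A's loop is the first success over the children list
theorem fpLoop_eq_findSome (f : Nat) (s : String) (patterns : List String) :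
    ∀ is : List Int,
      fpLoop f s patterns is =
        (fpChildren s patterns is).findSome? (fun sp => fpA f sp.1 sp.2) := by
  intro is
  induction is with
  | nil => simp [fpLoop, fpChildren]
  | cons i rest ihl =>
    rw [fpLoop, fpChildren_cons]
    split
    · simpa using ihl
    · simp only [List.cons_append, List.nil_append, List.findSome?_cons]
      split
      · rename_i r hr
        rw [if_neg]
        · simp [hr]
        · have := fpA_some_length f _ _ _ hr
          intro h; subst h; simp at this
      · rename_i hr
        simp [hr, ihl]

-- weight of a state: an upper bound on the number of stack pops its subtree causes
def wt : Nat → Nat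
  | 0 => 41371
  | 1 => 2955
  | 2 => 211
  | 3 => 15
  | _ + 4 => 1

theorem wt_pos (L : Nat) : 1 ≤ wt L := by
  match L with
  | 0 | 1 | 2 | 3 => decide
  | _ + 4 => exact Nat.le_refl 1

theorem wt_le (L : Nat) : wt L ≤ 41371 := by
  match L with
  | 0 | 1 | 2 | 3 => decide
  | _ + 4 => simp [wt]

theorem wt_step (L : Nat) (h : L ≤ 3) : 1 + 14 * wt (L + 1) ≤ wt L := by
  interval_cases L <;> decide

def stackWt (st : List (String × List String)) : Nat :=
  (st.map (fun sp => wt sp.2.length)).sum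

theorem stackWt_children (s : String) (patterns : List String) (is : List Int)
    (hlen : is.length ≤ 14) :
    stackWt (fpChildren s patterns is) ≤ 14 * wt (patterns.length + 1) := by
  have hmem := fpChildren_mem s patterns is
  have hl : (fpChildren s patterns is).length ≤ 14 :=
    le_trans (fpChildren_length s patterns is) hlen
  unfold stackWt
  calc ((fpChildren s patterns is).map (fun sp => wt sp.2.length)).sum
      ≤ ((fpChildren s patterns is).map (fun _ => wt (patterns.length + 1))).sum := by
        apply List.sum_le_sum
        intro c hc
        rw [hmem c hc]
    _ = (fpChildren s patterns is).length * wt (patterns.length + 1) := by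
        rw [List.map_const', List.sum_replicate, smul_eq_mul]
    _ ≤ 14 * wt (patterns.length + 1) := Nat.mul_le_mul_right _ hl

-- the stack machine computes the first success of A over the stack states
theorem fpStack_eq :
    ∀ (f : Nat) (st : List (String × List String)), stackWt st ≤ f →
      fpStack f st = st.findSome? (fun sp => fpA 5 sp.1 sp.2) := by
  intro f
  induction f with
  | zero =>
    intro st h
    cases st with
    | nil => simp [fpStack]
    | cons c rest =>
      exfalso
      have := wt_pos c.2.length
      simp [stackWt] at h
      omega
  | succ f ih =>
    intro st h
    cases st with
    | nil => simp [fpStack]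
    | cons c rest =>
      obtain ⟨s, patterns⟩ := c
      have hrest : stackWt rest ≤ f := by
        have := wt_pos patterns.length
        simp [stackWt] at h ⊢
        omega
      rw [fpStack]
      split
      · rename_i h3
        rw [ih rest hrest, List.findSome?_cons]
        rw [show fpA 5 s patterns = none by rw [show (5:Nat) = 4+1 from rfl, fpA, if_pos h3]]
      · rename_i h3
        split
        · rename_i hfin
          rw [List.findSome?_cons]
          rw [show fpA 5 s patterns = some patterns by
            rw [show (5:Nat) = 4+1 from rfl, fpA, if_neg h3, if_pos hfin]]
        · rename_i hfin
          have hL : patterns.length ≤ 3 := by omega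
          have hislen :
              (PySem.List.pyRange (min 5 (PySem.Str.len s)) (min 19 (PySem.Str.len s)) 1).length ≤ 14 := by
            rw [PySem.List.length_pyRange_one]
            omega
          have hch := stackWt_children s patterns _ hislen
          have hsum : stackWt (fpChildren s patterns
              (PySem.List.pyRange (min 5 (PySem.Str.len s)) (min 19 (PySem.Str.len s)) 1)
                ++ rest) ≤ f := by
            have hstep := wt_step patterns.length hL
            simp only [stackWt, List.map_append, List.sum_append] at hch ⊢
            simp only [stackWt, List.map_cons, List.sum_cons] at h hrest
            omega
          rw [ih _ hsum, List.findSome?_append, List.findSome?_cons]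
          have hA : fpA 5 s patterns =
              (fpChildren s patterns
                (PySem.List.pyRange (min 5 (PySem.Str.len s)) (min 19 (PySem.Str.len s)) 1)).findSome?
                (fun sp => fpA 5 sp.1 sp.2) := by
            rw [show (5:Nat) = 4+1 from rfl, fpA, if_neg h3, if_neg hfin, fpLoop_eq_findSome]
            apply findSome?_congr_mem
            intro c hc
            exact fpA_stable 4 5 c.1 c.2
              (by have := fpChildren_mem s patterns _ c hc; omega)
              (by have := fpChildren_mem s patterns _ c hc; omega)
          rw [hA]
          cases hfs : (fpChildren s patterns
              (PySem.List.pyRange (min 5 (PySem.Str.len s)) (min 19 (PySem.Str.len s)) 1)).findSome?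
              (fun sp => fpA 5 sp.1 sp.2) <;> simp [Option.or]

-- ===== VERDICT (by name: the statement is the Claim_ definition above) =====
theorem find_patterns_spec : Claim_equal_find_patterns := by
  intro s patterns _
  unfold Spec_find_patterns find_patterns find_patterns_alt
  rw [fpStack_eq 50000 [(s, patterns)]
        (by have := wt_le patterns.length; simp [stackWt]; omega)]
  cases h : fpA 5 s patterns <;> simp [List.findSome?, h]
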